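-- pv_equiv track=rewrite | github.com/juyongc/Up-Algorithms | PROG_더맵게.py | solution
-- ===== SOURCE A (Python) =====
-- def solution(scov, K):
--     scov.sort()
--     cnt = 0
--     while scov[0] < K:
--         if len(scov) == 1:
--             return -1
--         else:
--             f = scov.pop(0)
--             s = scov.pop(0)
--             new = f + 2*s
--             scov.append(new)
--             scov.sort()
--             cnt += 1
--     answer = cnt
--     return answer
-- ===== SOURCE B (Python) =====
-- def _mk(v, l, r):
--     # leftist node with value v and subtrees l, r, shorter rank to the right
--     rl = l[1] if l is not None else 0
--     rr = r[1] if r is not None else 0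
--     if rl >= rr:
--         return (v, rr + 1, l, r)
--     return (v, rl + 1, r, l)
--
--
-- def _merge(a, b):
--     # merge two leftist min-heaps; node = (value, rank, left, right), empty = None
--     if a is None:
--         return b
--     if b is None:
--         return a
--     if b[0] < a[0]:
--         return _mk(b[0], b[2], _merge(a, b[3]))
--     return _mk(a[0], a[2], _merge(a[3], b))
--
--
-- def solution(scov, K):
--     # Leftist min-heap instead of A's sort-every-round loop; A sorts the caller's
--     # list in place, B leaves it untouched (return value only).
--     h = None
--     for v in scov:
--         h = _merge(h, (v, 1, None, None))
--     cnt = 0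
--     while h[0] < K:
--         if h[2] is None and h[3] is None:
--             return -1
--         f = h[0]
--         h = _merge(h[2], h[3])
--         s = h[0]
--         h = _merge(h[2], h[3])
--         h = _merge(h, (f + 2 * s, 1, None, None))
--         cnt += 1
--     return cnt
-- ===== Notes on version B (the rewrite author's own statement) =====
-- stated objective: faster
-- what changed: A keeps a flat list and calls sort() plus two O(n) front-pops every round; B builds a leftist min-heap (value,rank,left,right tuples) once and does each round with three O(log n) heap merges, never sorting at all.
import Mathlib
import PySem

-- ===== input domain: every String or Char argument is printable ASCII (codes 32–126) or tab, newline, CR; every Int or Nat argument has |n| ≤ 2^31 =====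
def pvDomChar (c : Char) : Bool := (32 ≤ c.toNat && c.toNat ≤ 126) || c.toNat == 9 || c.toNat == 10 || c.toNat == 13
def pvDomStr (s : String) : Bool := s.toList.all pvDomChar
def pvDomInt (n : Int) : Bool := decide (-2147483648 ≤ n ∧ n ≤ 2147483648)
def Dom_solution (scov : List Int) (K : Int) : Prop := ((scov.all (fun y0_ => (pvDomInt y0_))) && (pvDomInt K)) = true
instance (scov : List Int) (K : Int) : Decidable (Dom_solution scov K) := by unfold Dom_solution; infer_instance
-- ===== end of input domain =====

-- B replaces A's flat list with a per-round sort() call by a leftist min-heap built once,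
-- each round doing three heap merges and no sorting. Return value only: Python A sorts
-- the caller's list in place, B does not mutate it.

-- ===== PORT A =====
-- A's while loop: at its head the list is sorted; pop(0) twice, append the mix, re-sort.
def solutionLoop (K : Int) (xs : List Int) (cnt : Int) : Int :=
  match xs with
  | [] => 0          -- scov[0] raises IndexError here; excluded by Pre_solution
  | x :: rest =>
    if x < K then
      if (x :: rest).length == 1 then -1
      else
        match rest with
        | [] => 0    -- unreachable: len(scov) ≠ 1 was just checked
        | s :: rest2 =>
          -- f = scov.pop(0); s = scov.pop(0); scov.append(f+2*s); scov.sort()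
          solutionLoop K (PySem.List.sorted (rest2 ++ [x + 2 * s]) (fun y => y) false) (cnt + 1)
    else cnt
termination_by xs.length
decreasing_by simp [PySem.List.length_sorted]

def solution (scov : List Int) (K : Int) : Int :=
  solutionLoop K (PySem.List.sorted scov (fun y => y) false) 0

-- ===== PORT B =====
-- Source B's heap: node = (value, rank, left, right), empty = None
inductive LHeap where
  | nil : LHeap
  | node : Int → Int → LHeap → LHeap → LHeap
deriving DecidableEq, Repr

-- '(x[1] if x is not None else 0)'
def LHeap.rank : LHeap → Int
  | .nil => 0
  | .node _ rk _ _ => rk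

-- only for termination measures of the ports (no counterpart in Source B)
def LHeap.size : LHeap → Nat
  | .nil => 0
  | .node _ _ l r => l.size + r.size + 1

-- Source B's _mk: leftist node with value v and subtrees l, r, shorter rank to the right
def mkNode (v : Int) (l r : LHeap) : LHeap :=
  if l.rank ≥ r.rank then .node v (r.rank + 1) l r else .node v (l.rank + 1) r l

-- Source B's _merge, step for step. The Nat fuel only makes the recursion structural
-- (a totality guard): |a|+|b| bounds the recursion depth, so the 0-fuel arm is
-- never reached on the calls lmerge makes.
def lmergeF : Nat → LHeap → LHeap → LHeap
  | _, .nil, b => b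
  | _, a, .nil => a
  | 0, _, b => b        -- unreachable: fuel ≥ size a + size b > 0 here
  | n + 1, .node va ra la rra, .node vb rb lb rrb =>
    if vb < va then mkNode vb lb (lmergeF n (.node va ra la rra) rrb)
    else mkNode va la (lmergeF n rra (.node vb rb lb rrb))

def lmerge (a b : LHeap) : LHeap := lmergeF (a.size + b.size) a b

-- Source B's while loop. The Nat fuel is again only a totality guard: the heap loses
-- one element per round, so fuel = heap size reaches the 0-fuel arm only at .nil.
def altLoopF : Nat → Int → LHeap → Int → Int
  | _, _, .nil, _ => 0      -- h[0] raises here (h is None); excluded by Pre_solution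
  | 0, _, _, cnt => cnt     -- unreachable: fuel ≥ size h > 0 here
  | m + 1, K, .node v _ l r, cnt =>
    if v < K then
      -- 'if h[2] is None and h[3] is None: return -1'
      if l = .nil ∧ r = .nil then -1
      else
        match lmerge l r with
        | .nil => 0           -- unreachable: the heap has at least two elements
        | .node s _ l1 r1 =>
          -- f = h[0]; h = merge children; s = h[0]; h = merge children; push f+2s
          altLoopF m K (lmerge (lmerge l1 r1) (.node (v + 2 * s) 1 .nil .nil)) (cnt + 1)
    else cnt

def solution_alt (scov : List Int) (K : Int) : Int :=
  altLoopF (scov.foldl (fun h v => lmerge h (.node v 1 .nil .nil)) .nil).size K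
    (scov.foldl (fun h v => lmerge h (.node v 1 .nil .nil)) .nil) 0

-- ===== PRECONDITION & SPEC =====
-- Pre_ excludes only the empty list, on which Python A raises IndexError at scov[0]
-- (and B a TypeError at h[0]).
def Pre_solution (scov : List Int) (K : Int) : Prop := scov ≠ []
instance (scov : List Int) (K : Int) : Decidable (Pre_solution scov K) := by unfold Pre_solution; infer_instance
def pvWitness_solution : List Int × Int := ([1, 2, 9], 6)

def Spec_solution (scov : List Int) (K : Int) (out : Int) : Prop := out = solution_alt scov K
instance (scov : List Int) (K : Int) (out : Int) : Decidable (Spec_solution scov K out) := by unfold Spec_solution; infer_instance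

-- ===== CLAIM (what is proved, stated in full; the proofs are below) =====
def Claim_equal_solution : Prop := ∀ (scov : List Int) (K : Int), Dom_solution scov K → Pre_solution scov K → Spec_solution scov K (solution scov K)

-- ===== LEMMAS AND PROOFS =====

def LHeap.toMul : LHeap → Multiset Int
  | .nil => 0
  | .node v _ l r => v ::ₘ (l.toMul + r.toMul)

-- heap invariant: each node's value is ≤ everything below it
def LHeap.WF : LHeap → Prop
  | .nil => True
  | .node v _ l r => (∀ x ∈ l.toMul + r.toMul, v ≤ x) ∧ l.WF ∧ r.WF

lemma toMul_eq_zero_iff (h : LHeap) : h.toMul = 0 ↔ h = .nil := by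
  cases h <;> simp [LHeap.toMul]

lemma mkNode_toMul (v : Int) (l r : LHeap) :
    (mkNode v l r).toMul = v ::ₘ (l.toMul + r.toMul) := by
  unfold mkNode; split <;> simp [LHeap.toMul, add_comm]

lemma lmergeF_toMul : ∀ (n : Nat) (a b : LHeap), a.size + b.size ≤ n →
    (lmergeF n a b).toMul = a.toMul + b.toMul := by
  intro n
  induction n with
  | zero =>
    intro a b hle
    cases a <;> cases b <;> simp only [LHeap.size] at hle <;>
      simp [lmergeF, LHeap.toMul] <;> omega
  | succ n ih =>
    intro a b hle
    cases a with
    | nil => simp [lmergeF, LHeap.toMul]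
    | node va ra la rra =>
      cases b with
      | nil => simp [lmergeF, LHeap.toMul]
      | node vb rb lb rrb =>
        rw [lmergeF]
        split
        · rw [mkNode_toMul, ih (.node va ra la rra) rrb
            (by simp only [LHeap.size] at hle ⊢; omega)]
          simp only [LHeap.toMul, ← Multiset.singleton_add]
          abel
        · rw [mkNode_toMul, ih rra (.node vb rb lb rrb)
            (by simp only [LHeap.size] at hle ⊢; omega)]
          simp only [LHeap.toMul, ← Multiset.singleton_add]
          abel

lemma lmerge_toMul (a b : LHeap) : (lmerge a b).toMul = a.toMul + b.toMul :=
  lmergeF_toMul (a.size + b.size) a b le_rfl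

lemma mkNode_WF (v : Int) (l r : LHeap)
    (hmin : ∀ x ∈ l.toMul + r.toMul, v ≤ x) (hl : l.WF) (hr : r.WF) :
    (mkNode v l r).WF := by
  unfold mkNode; split
  · exact ⟨hmin, hl, hr⟩
  · refine ⟨?_, hr, hl⟩
    intro x hx
    exact hmin x (by rw [Multiset.mem_add] at hx ⊢; tauto)

lemma WF_root_le (v rk : Int) (l r : LHeap) (hw : (LHeap.node v rk l r).WF) :
    ∀ x ∈ (LHeap.node v rk l r).toMul, v ≤ x := by
  intro x hx
  simp only [LHeap.toMul, Multiset.mem_cons] at hx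
  rcases hx with rfl | hx
  · exact le_refl x
  · exact hw.1 x hx

lemma lmergeF_WF : ∀ (n : Nat) (a b : LHeap), a.size + b.size ≤ n →
    a.WF → b.WF → (lmergeF n a b).WF := by
  intro n
  induction n with
  | zero =>
    intro a b hle ha hb
    cases a <;> cases b <;> first
      | exact trivial
      | (simp only [LHeap.size] at hle; omega)
  | succ n ih =>
    intro a b hle ha hb
    cases a with
    | nil => simpa [lmergeF] using hb
    | node va ra la rra =>
      cases b with
      | nil => simpa [lmergeF] using ha
      | node vb rb lb rrb =>
        rw [lmergeF]
        have hbound1 : (LHeap.node va ra la rra).size + rrb.size ≤ n := by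
          simp only [LHeap.size] at hle ⊢; omega
        have hbound2 : rra.size + (LHeap.node vb rb lb rrb).size ≤ n := by
          simp only [LHeap.size] at hle ⊢; omega
        split
        · rename_i hlt
          refine mkNode_WF _ _ _ ?_ hb.2.1 (ih _ _ hbound1 ha hb.2.2)
          intro x hx
          rw [Multiset.mem_add, lmergeF_toMul n _ _ hbound1, Multiset.mem_add] at hx
          rcases hx with hx | hx | hx
          · exact hb.1 x (Multiset.mem_add.mpr (Or.inl hx))
          · exact le_trans (le_of_lt hlt) (WF_root_le va ra la rra ha x hx)
          · exact hb.1 x (Multiset.mem_add.mpr (Or.inr hx))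
        · rename_i hlt
          refine mkNode_WF _ _ _ ?_ ha.2.1 (ih _ _ hbound2 ha.2.2 hb)
          intro x hx
          rw [Multiset.mem_add, lmergeF_toMul n _ _ hbound2, Multiset.mem_add] at hx
          rcases hx with hx | hx | hx
          · exact ha.1 x (Multiset.mem_add.mpr (Or.inl hx))
          · exact ha.1 x (Multiset.mem_add.mpr (Or.inr hx))
          · exact le_trans (by omega) (WF_root_le vb rb lb rrb hb x hx)

lemma lmerge_WF (a b : LHeap) (ha : a.WF) (hb : b.WF) : (lmerge a b).WF :=
  lmergeF_WF (a.size + b.size) a b le_rfl ha hb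

-- a sorted list and a WF heap carrying the same multiset have the same head/root
lemma head_eq_root (a : Int) (t : List Int) (v rk : Int) (l r : LHeap)
    (hp : (a :: t).Pairwise (· ≤ ·))
    (hw : (LHeap.node v rk l r).WF)
    (hm : ((a :: t : List Int) : Multiset Int) = (LHeap.node v rk l r).toMul) : a = v := by
  have hv_mem : v ∈ ((a :: t : List Int) : Multiset Int) := by
    rw [hm]; simp [LHeap.toMul]
  have ha_mem : a ∈ (LHeap.node v rk l r).toMul := by
    rw [← hm]; simp
  have h1 : a ≤ v := by
    rw [Multiset.mem_coe, List.mem_cons] at hv_mem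
    rcases hv_mem with rfl | hv
    · rfl
    · exact (List.pairwise_cons.mp hp).1 v hv
  have h2 : v ≤ a := WF_root_le v rk l r hw a ha_mem
  omega

lemma foldl_toMul_gen (scov : List Int) (h0 : LHeap) :
    ((scov : Multiset Int) + h0.toMul)
      = (scov.foldl (fun h v => lmerge h (.node v 1 .nil .nil)) h0).toMul := by
  induction scov generalizing h0 with
  | nil => simp
  | cons x t ihx =>
    simp only [List.foldl_cons]
    rw [← ihx, lmerge_toMul]
    simp only [LHeap.toMul, ← Multiset.cons_coe, ← Multiset.singleton_add, Multiset.add_zero]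
    abel

lemma foldl_toMul (scov : List Int) :
    (scov : Multiset Int) = (scov.foldl (fun h v => lmerge h (.node v 1 .nil .nil)) .nil).toMul := by
  have hgen := foldl_toMul_gen scov .nil
  simpa [LHeap.toMul] using hgen

lemma foldl_WF (scov : List Int) :
    (scov.foldl (fun h v => lmerge h (.node v 1 .nil .nil)) .nil).WF := by
  have hgen : ∀ (h0 : LHeap), h0.WF →
      (scov.foldl (fun h v => lmerge h (.node v 1 .nil .nil)) h0).WF := by
    induction scov with
    | nil => intro h0 hw; exact hw
    | cons x t ihx =>
      intro h0 hw
      exact ihx _ (lmerge_WF _ _ hw ⟨by simp [LHeap.toMul], trivial, trivial⟩)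
  exact hgen .nil trivial

lemma toMul_card : ∀ (h : LHeap), h.toMul.card = h.size
  | .nil => by simp [LHeap.toMul, LHeap.size]
  | .node v rk l r => by
    simp [LHeap.toMul, LHeap.size, toMul_card l, toMul_card r]

lemma loops_agree (K : Int) :
    ∀ (n : Nat) (xs : List Int) (h : LHeap) (m : Nat) (cnt : Int), xs.length ≤ n → xs ≠ [] →
      xs.Pairwise (· ≤ ·) → ((xs : Multiset Int) = h.toMul) → h.WF → h.size ≤ m →
      solutionLoop K xs cnt = altLoopF m K h cnt := by
  intro n
  induction n with
  | zero =>
    intro xs h m cnt hlen hne _ _ _ _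
    cases xs with
    | nil => exact absurd rfl hne
    | cons a t => simp at hlen
  | succ n ih =>
    intro xs h m cnt hlen hne hpw hm hw hsz
    rcases xs with _ | ⟨a, t⟩
    · exact absurd rfl hne
    rcases h with _ | ⟨v, rk, l, r⟩
    · exact absurd (by simpa using hm) (by simp [LHeap.toMul])
    have hav : a = v := head_eq_root a t v rk l r hpw hw hm
    subst hav
    have hchild : (t : Multiset Int) = l.toMul + r.toMul := by
      have h2 : a ::ₘ (t : Multiset Int) = a ::ₘ (l.toMul + r.toMul) := by
        simpa [LHeap.toMul] using hm
      exact (Multiset.cons_inj_right a).mp h2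
    -- the heap and the list have the same number of elements
    have hcard : t.length + 1 = (LHeap.node a rk l r).size := by
      have hc := congrArg Multiset.card hm
      simpa [toMul_card] using hc
    rcases m with _ | m
    · exfalso; simp only [LHeap.size] at hsz hcard; omega
    rw [solutionLoop.eq_def, altLoopF.eq_def]
    simp only []
    by_cases hK : a < K
    · simp only [hK, if_true]
      rcases t with _ | ⟨b, rest⟩
      · -- singleton: both children must be nil, both sides return -1
        have h0 : l.toMul + r.toMul = 0 := by simpa using hchild.symm
        have hc := congrArg Multiset.card h0
        simp only [Multiset.card_add, Multiset.card_zero, Nat.add_eq_zero_iff] at hc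
        have hl : l = .nil := (toMul_eq_zero_iff l).mp (Multiset.card_eq_zero.mp hc.1)
        have hr : r = .nil := (toMul_eq_zero_iff r).mp (Multiset.card_eq_zero.mp hc.2)
        subst hl; subst hr
        simp
      · -- at least two elements
        have hlen2 : ((rest.length + 1 + 1 == 1) : Bool) = false := by simp
        simp only [List.length_cons, hlen2, Bool.false_eq_true, if_false]
        -- the heap side cannot take the (-1) branch: l, r not both nil
        have hlr : ¬ (l = .nil ∧ r = .nil) := by
          rintro ⟨rfl, rfl⟩
          have hz : (b ::ₘ (rest : Multiset Int)) = 0 := by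
            simpa [LHeap.toMul] using hchild
          simp at hz
        rw [if_neg hlr]
        have hm1 : ((b :: rest : List Int) : Multiset Int) = (lmerge l r).toMul := by
          rw [lmerge_toMul, ← hchild]
        have hw1 : (lmerge l r).WF := lmerge_WF l r hw.2.1 hw.2.2
        have hpw1 : (b :: rest).Pairwise (· ≤ ·) := (List.pairwise_cons.mp hpw).2
        split
        · -- lmerge l r = nil is impossible
          rename_i heq
          rw [heq] at hm1
          simp [LHeap.toMul] at hm1
        · rename_i s rk1 l1 r1 heq
          rw [heq] at hm1 hw1
          have hbs : b = s := head_eq_root b rest s rk1 l1 r1 hpw1 hw1 hm1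
          subst hbs
          have hchild1 : (rest : Multiset Int) = l1.toMul + r1.toMul := by
            have h2 : b ::ₘ (rest : Multiset Int) = b ::ₘ (l1.toMul + r1.toMul) := by
              simpa [LHeap.toMul] using hm1
            exact (Multiset.cons_inj_right b).mp h2
          -- next states carry the same multiset
          have hmnext : ((PySem.List.sorted (rest ++ [a + 2 * b]) (fun y => y) false : List Int) : Multiset Int)
              = (lmerge (lmerge l1 r1) (.node (a + 2 * b) 1 .nil .nil)).toMul := by
            have hperm : (PySem.List.sorted (rest ++ [a + 2 * b]) (fun y => y) false).Perm (rest ++ [a + 2 * b]) :=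
              PySem.List.sorted_perm _ _ _
            rw [Multiset.coe_eq_coe.mpr hperm]
            rw [lmerge_toMul, lmerge_toMul]
            simp only [LHeap.toMul, ← hchild1, ← Multiset.singleton_add,
              ← Multiset.coe_add, ← Multiset.coe_singleton, Multiset.add_zero]
          have hwnext : (lmerge (lmerge l1 r1) (.node (a + 2 * b) 1 .nil .nil)).WF := by
            refine lmerge_WF _ _ (lmerge_WF _ _ hw1.2.1 hw1.2.2) ?_
            exact ⟨by simp [LHeap.toMul], trivial, trivial⟩
          have hlennext : (PySem.List.sorted (rest ++ [a + 2 * b]) (fun y => y) false).length ≤ n := by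
            rw [PySem.List.length_sorted]
            simp only [List.length_cons] at hlen
            simp
            omega
          have hnenext : PySem.List.sorted (rest ++ [a + 2 * b]) (fun y => y) false ≠ [] := by
            rw [Ne, PySem.List.sorted_eq_nil_iff]
            simp
          have hpwnext : (PySem.List.sorted (rest ++ [a + 2 * b]) (fun y => y) false).Pairwise (· ≤ ·) := by
            simpa using PySem.List.sorted_pairwise (rest ++ [a + 2 * b]) (fun y => y)
          have hsznext : (lmerge (lmerge l1 r1) (.node (a + 2 * b) 1 .nil .nil)).size ≤ m := by
            have hc := congrArg Multiset.card hmnext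
            rw [toMul_card] at hc
            simp only [Multiset.coe_card, PySem.List.length_sorted, List.length_append,
              List.length_cons, List.length_nil] at hc
            simp only [LHeap.size, List.length_cons] at hsz hcard
            omega
          exact ih _ _ m _ hlennext hnenext hpwnext hmnext hwnext hsznext
    · simp [hK]

-- ===== VERDICT (by name: the statement is the Claim_ definition above) =====
theorem solution_spec : Claim_equal_solution := by
  intro scov K _hdom hpre
  unfold Spec_solution solution solution_alt
  refine (loops_agree K (PySem.List.sorted scov (fun y => y) false).length
    (PySem.List.sorted scov (fun y => y) false)
    (scov.foldl (fun h v => lmerge h (.node v 1 .nil .nil)) .nil) _ 0 le_rfl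
    ?_ ?_ ?_ ?_ le_rfl)
  · simpa [Ne, PySem.List.sorted_eq_nil_iff] using hpre
  · simpa using PySem.List.sorted_pairwise scov (fun y => y)
  · rw [Multiset.coe_eq_coe.mpr (PySem.List.sorted_perm scov (fun y => y) false)]
    exact foldl_toMul scov
  · exact foldl_WF scov
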